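-- pv_equiv track=rewrite | github.com/eronekogin/leetcode | Accepted/distinct_echo_substrings.py | distinctEchoSubstrings
-- ===== SOURCE A (Python) =====
-- def distinctEchoSubstrings(text: str) -> int:
--     N = len(text)
--     candidates = set()
--     for windowLen in range(1, (N >> 1) + 1):
--         l, r = 0, windowLen
--         equalChars = 0
--         while l < N - windowLen:
--             if text[l] == text[r]:
--                 equalChars += 1
--             else:
--                 equalChars = 0
--
--             if equalChars == windowLen:  # Found a candidate.
--                 candidates.add(text[l - windowLen + 1: l + 1])
--                 equalChars -= 1  # Don't count the current char.
--
--             l, r = l + 1, r + 1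
--
--     return len(candidates)
-- ===== SOURCE B (Python) =====
-- def distinctEchoSubstrings(text: str) -> int:
--     # Distinct echo substrings are in bijection with their first halves,
--     # so collecting the halves gives the same count.
--     n = len(text)
--     halves = set()
--     for w in range(1, n // 2 + 1):
--         for i in range(n - 2 * w + 1):
--             h = text[i:i + w]
--             if text.startswith(h, i + w):
--                 halves.add(h)
--     return len(halves)
-- ===== Notes on version B (the rewrite author's own statement) =====
-- stated objective: simpler
-- what changed: Replaces A's sliding equal-chars run counter (stateful reset/decrement bookkeeping) by a direct per-(length,start) check that the text repeats the candidate half at the shifted offset (str.startswith), collecting the halves in a set.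
import Mathlib
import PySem

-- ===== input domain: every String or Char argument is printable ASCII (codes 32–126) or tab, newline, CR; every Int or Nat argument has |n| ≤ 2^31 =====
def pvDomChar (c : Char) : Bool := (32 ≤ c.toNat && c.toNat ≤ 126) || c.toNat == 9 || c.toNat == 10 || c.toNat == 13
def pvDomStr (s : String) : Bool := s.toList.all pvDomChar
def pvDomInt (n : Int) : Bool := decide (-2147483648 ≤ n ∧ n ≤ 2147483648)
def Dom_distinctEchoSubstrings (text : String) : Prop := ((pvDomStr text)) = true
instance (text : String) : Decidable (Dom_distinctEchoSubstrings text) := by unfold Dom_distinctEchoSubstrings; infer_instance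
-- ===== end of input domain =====

-- B replaces A's sliding equal-chars run counter by a direct per-(length,start)
-- comparison of the two halves, collecting the first halves in a set (same count).

-- ===== PORT A =====
def distinctEchoSubstrings (text : String) : Int :=
  let N : Int := PySem.Str.len text
  let candidates : PySem.Set String := PySem.Set.empty
  let candidates :=
    (PySem.List.pyRange 1 ((N >>> 1) + 1) 1).foldl (fun cands windowLen =>
      ((PySem.List.pyRange 0 (N - windowLen) 1).foldl
        (fun (st : PySem.Set String × Int) l =>
          let equalChars : Int :=
            if PySem.Str.pyGet? text l == PySem.Str.pyGet? text (l + windowLen)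
            then st.2 + 1 else 0
          if equalChars == windowLen then
            (PySem.Set.add st.1
              (PySem.Str.slice text (some (l - windowLen + 1)) (some (l + 1))),
             equalChars - 1)
          else (st.1, equalChars))
        (cands, 0)).1)
      candidates
  PySem.Set.len candidates

-- ===== PORT B =====
-- Python's s.startswith(p, k) for 0 <= k is exactly s[k : k + len(p)] == p
-- (hand-ported helper; exact on the nonnegative offsets B uses).
def strStartswithAt (s p : String) (k : Int) : Bool :=
  PySem.Str.slice s (some k) (some (k + PySem.Str.len p)) == p

def distinctEchoSubstrings_alt (text : String) : Int :=
  let n : Int := PySem.Str.len text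
  let halves : PySem.Set String :=
    (PySem.List.pyRange 1 (PySem.Int.floordiv n 2 + 1) 1).foldl (fun s w =>
      (PySem.List.pyRange 0 (n - 2 * w + 1) 1).foldl (fun s i =>
        let h := PySem.Str.slice text (some i) (some (i + w))
        if strStartswithAt text h (i + w) then PySem.Set.add s h
        else s) s)
      PySem.Set.empty
  PySem.Set.len halves

-- ===== PRECONDITION & SPEC =====
def Spec_distinctEchoSubstrings (text : String) (out : Int) : Prop := out = distinctEchoSubstrings_alt text
instance (text : String) (out : Int) : Decidable (Spec_distinctEchoSubstrings text out) := by unfold Spec_distinctEchoSubstrings; infer_instance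

-- ===== CLAIM (what is proved, stated in full; the proofs are below) =====
def Claim_equal_distinctEchoSubstrings : Prop := ∀ (text : String), Dom_distinctEchoSubstrings text → Spec_distinctEchoSubstrings text (distinctEchoSubstrings text)

-- ===== LEMMAS AND PROOFS =====

def pvMatch (cs : List Char) (w j : Nat) : Bool := cs[j]? == cs[j + w]?
def pvRun (cs : List Char) (w : Nat) : Nat → Nat
  | 0 => 0
  | n + 1 => if pvMatch cs w n then pvRun cs w n + 1 else 0

def pvHalf (cs : List Char) (i w : Nat) : String := String.ofList ((cs.drop i).take w)

def pvHitsA (cs : List Char) (w : Nat) : Nat → List String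
  | 0 => []
  | n + 1 => pvHitsA cs w n ++
      (if w ≤ pvRun cs w (n + 1) then [pvHalf cs (n + 1 - w) w] else [])

def pvHitsB (cs : List Char) (w : Nat) : Nat → List String
  | 0 => []
  | m + 1 => pvHitsB cs w m ++
      (if (cs.drop (m + w)).take ((cs.drop m).take w).length = (cs.drop m).take w
       then [pvHalf cs m w] else [])

theorem slice_half (text : String) (i w : Nat) :
    PySem.Str.slice text (some (i : Int)) (some ((i : Int) + (w : Int))) = pvHalf text.toList i w := by
  rw [← String.toList_inj]
  simp [pvHalf, PySem.List.slice_natCast_add]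

theorem pvRun_ge_iff (cs : List Char) (w : Nat) :
    ∀ (n k : Nat), k ≤ pvRun cs w n ↔ k ≤ n ∧ ∀ j, n - k ≤ j → j < n → pvMatch cs w j := by
  intro n
  induction n with
  | zero =>
      intro k
      constructor
      · intro h
        exact ⟨by simpa [pvRun] using h, fun j _ hj => absurd hj (Nat.not_lt_zero j)⟩
      · intro h; simpa [pvRun] using h.1
  | succ n ih =>
      intro k
      by_cases hm : pvMatch cs w n
      · simp only [pvRun, hm, if_true]
        rcases Nat.eq_zero_or_pos k with rfl | hk
        · constructor
          · intro _
            exact ⟨Nat.zero_le _, fun j h1 h2 => absurd h2 (by omega)⟩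
          · intro _; exact Nat.zero_le _
        · have step : k ≤ pvRun cs w n + 1 ↔ k - 1 ≤ pvRun cs w n := by omega
          rw [step, ih (k - 1)]
          constructor
          · rintro ⟨h1, h2⟩
            refine ⟨by omega, fun j hj1 hj2 => ?_⟩
            rcases Nat.lt_or_ge j n with hj | hj
            · exact h2 j (by omega) hj
            · have : j = n := by omega
              subst this; exact hm
          · rintro ⟨h1, h2⟩
            exact ⟨by omega, fun j hj1 hj2 => h2 j (by omega) (by omega)⟩
      · simp [pvRun, hm]
        constructor
        · intro h
          have : k = 0 := by omega
          subst this
          exact ⟨Nat.zero_le _, fun j h1 h2 => absurd h2 (by omega)⟩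
        · rintro ⟨h1, h2⟩
          rcases Nat.eq_zero_or_pos k with rfl | hk
          · omega
          · exact absurd (h2 n (by omega) (by omega)) (by simpa using hm)

theorem take_eq_iff_match (cs : List Char) (w i : Nat) :
    (cs.drop i).take w = (cs.drop (i + w)).take w ↔
      ∀ j, i ≤ j → j < i + w → pvMatch cs w j := by
  rw [List.ext_getElem?_iff]
  constructor
  · intro he j hj1 hj2
    have := he (j - i)
    simp only [List.getElem?_take, List.getElem?_drop] at this
    rw [if_pos (by omega), if_pos (by omega)] at this
    have : cs[i + (j - i)]? = cs[i + w + (j - i)]? := this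
    simpa [pvMatch, show i + (j - i) = j by omega, show i + w + (j - i) = j + w by omega]
      using this
  · intro hm k
    simp only [List.getElem?_take, List.getElem?_drop]
    by_cases hk : k < w
    · rw [if_pos hk, if_pos hk]
      have := hm (i + k) (by omega) (by omega)
      simpa [pvMatch, show i + k + w = i + w + k by omega] using this
    · rw [if_neg hk, if_neg hk]

theorem innerB (text : String) (w : Nat) (s0 : PySem.Set String) (m : Nat) :
    (PySem.List.pyRange 0 (m : Int) 1).foldl
      (fun s i =>
        let h := PySem.Str.slice text (some i) (some (i + (w : Int)))
        if strStartswithAt text h (i + (w : Int)) then PySem.Set.add s h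
        else s) s0
    = PySem.Set.update s0 (pvHitsB text.toList w m) := by
  induction m with
  | zero => simp [PySem.List.pyRange_one_eq_nil, pvHitsB, PySem.Set.update]
  | succ m ih =>
      have hr : PySem.List.pyRange 0 ((m : Int) + 1) 1
          = PySem.List.pyRange 0 (m : Int) 1 ++ [(m : Int)] :=
        PySem.List.pyRange_one_succ_right (by omega)
      rw [show ((m + 1 : Nat) : Int) = (m : Int) + 1 by push_cast; ring, hr,
        List.foldl_append, ih]
      simp only [List.foldl_cons, List.foldl_nil]
      have h1 : PySem.Str.slice text (some (m : Int)) (some ((m : Int) + (w : Int)))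
          = pvHalf text.toList m w := slice_half text m w
      have hlen : PySem.Str.len (pvHalf text.toList m w)
          = (((text.toList.drop m).take w).length : Int) := by
        simp [pvHalf]
      have hcond : strStartswithAt text (pvHalf text.toList m w) ((m : Int) + (w : Int)) = true
          ↔ (text.toList.drop (m + w)).take ((text.toList.drop m).take w).length
              = (text.toList.drop m).take w := by
        rw [strStartswithAt, hlen,
          show (m : Int) + (w : Int) = ((m + w : Nat) : Int) by omega,
          show ((m + w : Nat) : Int) + (((text.toList.drop m).take w).length : Int)
            = ((m + w : Nat) : Int) + ((((text.toList.drop m).take w).length : Nat) : Int) by omega]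
        rw [show PySem.Str.slice text (some ((m + w : Nat) : Int))
              (some (((m + w : Nat) : Int) + ((((text.toList.drop m).take w).length : Nat) : Int)))
            = String.ofList ((text.toList.drop (m + w)).take ((text.toList.drop m).take w).length)
          from slice_half text (m + w) _]
        rw [beq_iff_eq, ← String.toList_inj]
        simp [pvHalf]
      rw [h1]
      by_cases hc : (text.toList.drop (m + w)).take ((text.toList.drop m).take w).length
          = (text.toList.drop m).take w
      · rw [if_pos (hcond.mpr hc), pvHitsB, if_pos hc]
        simp [PySem.Set.update]
      · rw [if_neg (fun hb => hc (hcond.mp hb)), pvHitsB, if_neg hc]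
        simp [PySem.Set.update]
theorem pvRun_le (cs : List Char) (w n : Nat) : pvRun cs w n ≤ n := by
  induction n with
  | zero => simp [pvRun]
  | succ n ih => unfold pvRun; split <;> omega

theorem innerA (text : String) (w : Nat) (hw : 1 ≤ w) (s0 : PySem.Set String) (n : Nat) :
    (PySem.List.pyRange 0 (n : Int) 1).foldl
      (fun (st : PySem.Set String × Int) l =>
        let equalChars : Int :=
          if PySem.Str.pyGet? text l == PySem.Str.pyGet? text (l + (w : Int))
          then st.2 + 1 else 0
        if equalChars == (w : Int) then
          (PySem.Set.add st.1
            (PySem.Str.slice text (some (l - (w : Int) + 1)) (some (l + 1))),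
           equalChars - 1)
        else (st.1, equalChars)) (s0, 0)
    = (PySem.Set.update s0 (pvHitsA text.toList w n),
       if w ≤ pvRun text.toList w n then (w : Int) - 1 else (pvRun text.toList w n : Int)) := by
  induction n with
  | zero =>
      rw [show pvRun text.toList w 0 = 0 from rfl, if_neg (by omega)]
      simp [PySem.List.pyRange_one_eq_nil, pvHitsA, PySem.Set.update]
  | succ n ih =>
      have hr : PySem.List.pyRange 0 ((n : Int) + 1) 1
          = PySem.List.pyRange 0 (n : Int) 1 ++ [(n : Int)] :=
        PySem.List.pyRange_one_succ_right (by omega)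
      rw [show ((n + 1 : Nat) : Int) = (n : Int) + 1 by push_cast; ring, hr,
        List.foldl_append, ih]
      simp only [List.foldl_cons, List.foldl_nil]
      have hg : (PySem.Str.pyGet? text (n : Int) == PySem.Str.pyGet? text ((n : Int) + (w : Int)))
          = pvMatch text.toList w n := by
        rw [show (n : Int) + (w : Int) = ((n + w : Nat) : Int) by omega,
          PySem.Str.pyGet?_natCast, PySem.Str.pyGet?_natCast]
        rfl
      rw [hg]
      by_cases hm : pvMatch text.toList w n
      · have hrun : pvRun text.toList w (n + 1) = pvRun text.toList w n + 1 := by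
          simp [pvRun, hm]
        simp only [hm, if_true]
        by_cases hge : w ≤ pvRun text.toList w n
        · have hle : w ≤ n := le_trans hge (pvRun_le _ _ _)
          have hs : PySem.Str.slice text (some ((n : Int) - (w : Int) + 1)) (some ((n : Int) + 1))
              = pvHalf text.toList (n + 1 - w) w := by
            rw [show (n : Int) - (w : Int) + 1 = ((n + 1 - w : Nat) : Int) by omega,
              show (n : Int) + 1 = ((n + 1 - w : Nat) : Int) + (w : Int) by omega]
            exact slice_half text (n + 1 - w) w
          rw [if_pos hge, if_pos (by simp only [beq_iff_eq]; omega), hs,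
            pvHitsA, if_pos (by omega), if_pos (by omega), Prod.mk.injEq]
          exact ⟨by simp [PySem.Set.update], by omega⟩
        · rw [if_neg hge]
          by_cases heq : pvRun text.toList w n + 1 = w
          · have hle : w ≤ n + 1 := by have := pvRun_le text.toList w n; omega
            have hs : PySem.Str.slice text (some ((n : Int) - (w : Int) + 1)) (some ((n : Int) + 1))
                = pvHalf text.toList (n + 1 - w) w := by
              rw [show (n : Int) - (w : Int) + 1 = ((n + 1 - w : Nat) : Int) by omega,
                show (n : Int) + 1 = ((n + 1 - w : Nat) : Int) + (w : Int) by omega]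
              exact slice_half text (n + 1 - w) w
            rw [if_pos (by simp only [beq_iff_eq]; omega), hs,
              pvHitsA, if_pos (by omega), if_pos (by omega), Prod.mk.injEq]
            exact ⟨by simp [PySem.Set.update], by omega⟩
          · rw [if_neg (by simp only [beq_iff_eq]; omega),
              pvHitsA, if_neg (by omega), if_neg (by omega), Prod.mk.injEq]
            exact ⟨by simp [PySem.Set.update], by rw [hrun]; push_cast; ring⟩
      · have hrun : pvRun text.toList w (n + 1) = 0 := by simp [pvRun, hm]
        simp only [hm, Bool.false_eq_true, if_false]
        rw [if_neg (by simp only [beq_iff_eq]; omega),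
          pvHitsA, if_neg (by omega), if_neg (by omega), Prod.mk.injEq]
        exact ⟨by simp [PySem.Set.update], by simp [hrun]⟩

theorem mem_pvHitsA (cs : List Char) (w n : Nat) (x : String) :
    x ∈ pvHitsA cs w n ↔
      ∃ l, l < n ∧ w ≤ pvRun cs w (l + 1) ∧ x = pvHalf cs (l + 1 - w) w := by
  induction n with
  | zero => simp [pvHitsA]
  | succ n ih =>
      simp only [pvHitsA, List.mem_append, ih]
      constructor
      · rintro (⟨l, h1, h2, h3⟩ | h)
        · exact ⟨l, by omega, h2, h3⟩
        · split at h
          · rename_i hr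
            simp only [List.mem_singleton] at h
            exact ⟨n, by omega, hr, h⟩
          · simp at h
      · rintro ⟨l, h1, h2, h3⟩
        rcases Nat.lt_or_ge l n with hl | hl
        · exact Or.inl ⟨l, hl, h2, h3⟩
        · have : l = n := by omega
          subst this
          right; simp [h2, h3]

theorem mem_pvHitsB (cs : List Char) (w m : Nat) (x : String) :
    x ∈ pvHitsB cs w m ↔
      ∃ i, i < m ∧ (cs.drop (i + w)).take ((cs.drop i).take w).length = (cs.drop i).take w
        ∧ x = pvHalf cs i w := by
  induction m with
  | zero => simp [pvHitsB]
  | succ m ih =>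
      simp only [pvHitsB, List.mem_append, ih]
      constructor
      · rintro (⟨i, h1, h2, h3⟩ | h)
        · exact ⟨i, by omega, h2, h3⟩
        · split at h
          · rename_i hr
            simp only [List.mem_singleton] at h
            exact ⟨m, by omega, hr, h⟩
          · simp at h
      · rintro ⟨i, h1, h2, h3⟩
        rcases Nat.lt_or_ge i m with hi | hi
        · exact Or.inl ⟨i, hi, h2, h3⟩
        · have : i = m := by omega
          subst this
          right
          rw [if_pos h2]
          simp [h3]

theorem mem_hits_iff (cs : List Char) (w : Nat) (hw : 1 ≤ w) (h2w : 2 * w ≤ cs.length) (x : String) :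
    x ∈ pvHitsA cs w (cs.length - w) ↔ x ∈ pvHitsB cs w (cs.length - 2 * w + 1) := by
  rw [mem_pvHitsA, mem_pvHitsB]
  constructor
  · rintro ⟨l, hl, hrun, rfl⟩
    rw [pvRun_ge_iff] at hrun
    obtain ⟨hwl, hmatch⟩ := hrun
    refine ⟨l + 1 - w, by omega, ?_, rfl⟩
    rw [List.length_take, List.length_drop, min_eq_left (by omega), eq_comm,
      take_eq_iff_match]
    intro j h1 h2
    exact hmatch j (by omega) (by omega)
  · rintro ⟨i, hi, heq, rfl⟩
    rw [List.length_take, List.length_drop, min_eq_left (by omega), eq_comm] at heq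
    refine ⟨i + w - 1, by omega, ?_, by rw [show i + w - 1 + 1 - w = i by omega]⟩
    rw [pvRun_ge_iff, take_eq_iff_match] at *
    refine ⟨by omega, fun j h1 h2 => heq j (by omega) (by omega)⟩

-- ===== PORT A =====

theorem mem_foldl_update {α : Type} [BEq α] [LawfulBEq α]
    (ws : List Int) (L : Int → List α) (s0 : PySem.Set α) (x : α) :
    x ∈ ws.foldl (fun s w => PySem.Set.update s (L w)) s0 ↔
      x ∈ s0 ∨ ∃ w ∈ ws, x ∈ L w := by
  induction ws generalizing s0 with
  | nil => simp
  | cons w ws ih =>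
      simp only [List.foldl_cons, ih, PySem.Set.mem_update, List.mem_cons]
      constructor
      · rintro ((h | h) | ⟨w', hw', h⟩)
        · exact Or.inl h
        · exact Or.inr ⟨w, Or.inl rfl, h⟩
        · exact Or.inr ⟨w', Or.inr hw', h⟩
      · rintro (h | ⟨w', (rfl | hw'), h⟩)
        · exact Or.inl (Or.inl h)
        · exact Or.inl (Or.inr h)
        · exact Or.inr ⟨w', hw', h⟩

theorem nodup_foldl_update {α : Type} [BEq α] [LawfulBEq α]
    (ws : List Int) (L : Int → List α) (s0 : PySem.Set α) (h : s0.Nodup) :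
    (ws.foldl (fun s w => PySem.Set.update s (L w)) s0).Nodup := by
  induction ws generalizing s0 with
  | nil => exact h
  | cons w ws ih => exact ih _ (PySem.Set.nodup_update _ _ h)

theorem ports_eq (text : String) : distinctEchoSubstrings text = distinctEchoSubstrings_alt text := by
  unfold distinctEchoSubstrings distinctEchoSubstrings_alt
  simp only [PySem.Str.len_eq]
  rw [show ((text.toList.length : Int) >>> (1 : Int)) = ((text.toList.length / 2 : Nat) : Int) from rfl,
    show PySem.Int.floordiv (text.toList.length : Int) 2 = ((text.toList.length / 2 : Nat) : Int) from by
      rw [PySem.Int.floordiv_eq_ediv_of_pos (by omega)]; omega]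
  have hA : (PySem.List.pyRange 1 ((text.toList.length / 2 : Nat) + 1) 1).foldl
      (fun cands windowLen =>
        ((PySem.List.pyRange 0 ((text.toList.length : Int) - windowLen) 1).foldl
          (fun (st : PySem.Set String × Int) l =>
            let equalChars : Int :=
              if PySem.Str.pyGet? text l == PySem.Str.pyGet? text (l + windowLen)
              then st.2 + 1 else 0
            if equalChars == windowLen then
              (PySem.Set.add st.1
                (PySem.Str.slice text (some (l - windowLen + 1)) (some (l + 1))),
               equalChars - 1)
            else (st.1, equalChars))
          (cands, 0)).1) PySem.Set.empty
      = (PySem.List.pyRange 1 ((text.toList.length / 2 : Nat) + 1) 1).foldl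
        (fun s w' => PySem.Set.update s (pvHitsA text.toList w'.toNat (text.toList.length - w'.toNat)))
        PySem.Set.empty := by
    refine List.foldl_ext _ _ _ (fun s w' hmem => ?_)
    obtain ⟨h1, h2⟩ := (PySem.List.mem_pyRange_one).1 hmem
    obtain ⟨w, rfl⟩ : ∃ w : Nat, w' = (w : Int) := ⟨w'.toNat, by omega⟩
    have hwle : w ≤ text.toList.length := by omega
    rw [show (text.toList.length : Int) - (w : Int) = ((text.toList.length - w : Nat) : Int) by omega,
      innerA text w (by omega) s (text.toList.length - w)]
    simp
  have hB : (PySem.List.pyRange 1 ((text.toList.length / 2 : Nat) + 1) 1).foldl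
      (fun s w =>
        (PySem.List.pyRange 0 ((text.toList.length : Int) - 2 * w + 1) 1).foldl (fun s i =>
          let h := PySem.Str.slice text (some i) (some (i + w))
          if strStartswithAt text h (i + w) then PySem.Set.add s h
          else s) s) PySem.Set.empty
      = (PySem.List.pyRange 1 ((text.toList.length / 2 : Nat) + 1) 1).foldl
        (fun s w' => PySem.Set.update s (pvHitsB text.toList w'.toNat (text.toList.length - 2 * w'.toNat + 1)))
        PySem.Set.empty := by
    refine List.foldl_ext _ _ _ (fun s w' hmem => ?_)
    obtain ⟨h1, h2⟩ := (PySem.List.mem_pyRange_one).1 hmem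
    obtain ⟨w, rfl⟩ : ∃ w : Nat, w' = (w : Int) := ⟨w'.toNat, by omega⟩
    have hwle : 2 * w ≤ text.toList.length := by omega
    rw [show (text.toList.length : Int) - 2 * (w : Int) + 1
        = ((text.toList.length - 2 * w + 1 : Nat) : Int) by omega,
      innerB text w s (text.toList.length - 2 * w + 1)]
    simp
  rw [hA, hB]
  have hperm :
      ((PySem.List.pyRange 1 ((text.toList.length / 2 : Nat) + 1) 1).foldl
        (fun s w' => PySem.Set.update s (pvHitsA text.toList w'.toNat (text.toList.length - w'.toNat)))
        PySem.Set.empty).Perm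
      ((PySem.List.pyRange 1 ((text.toList.length / 2 : Nat) + 1) 1).foldl
        (fun s w' => PySem.Set.update s (pvHitsB text.toList w'.toNat (text.toList.length - 2 * w'.toNat + 1)))
        PySem.Set.empty) := by
    rw [List.perm_ext_iff_of_nodup
      (nodup_foldl_update _ _ PySem.Set.empty List.nodup_nil)
      (nodup_foldl_update _ _ PySem.Set.empty List.nodup_nil)]
    intro x
    rw [mem_foldl_update, mem_foldl_update]
    refine or_congr Iff.rfl ⟨?_, ?_⟩
    · rintro ⟨w', hw', hx⟩
      obtain ⟨h1, h2⟩ := (PySem.List.mem_pyRange_one).1 hw'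
      exact ⟨w', hw', (mem_hits_iff text.toList w'.toNat (by omega) (by omega) x).1 hx⟩
    · rintro ⟨w', hw', hx⟩
      obtain ⟨h1, h2⟩ := (PySem.List.mem_pyRange_one).1 hw'
      exact ⟨w', hw', (mem_hits_iff text.toList w'.toNat (by omega) (by omega) x).2 hx⟩
  exact congrArg (fun n : Nat => (n : Int)) hperm.length_eq


-- ===== VERDICT (by name: the statement is the Claim_ definition above) =====
theorem distinctEchoSubstrings_spec : Claim_equal_distinctEchoSubstrings := by
  intro text _
  unfold Spec_distinctEchoSubstrings
  exact ports_eq text
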